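-- pv_equiv track=rewrite | github.com/DanielHoj/me3cs | me3cs/framework/row_index.py | add_idx
-- ===== SOURCE A (Python) =====
-- def add_idx(existing: tuple, new: tuple) -> list:
--     c = []
--     for element in new:
--         count = sum(1 for x in existing if x <= element)
--         c.append(count + element)
--     c.extend(existing)
--     c.sort()
--     return c
-- ===== SOURCE B (Python) =====
-- def add_idx(existing: tuple, new: tuple) -> list:
--     s = sorted(existing)
--
--     def bisect_right(a, x):
--         lo, hi = 0, len(a)
--         while lo < hi:
--             mid = (lo + hi) // 2
--             if a[mid] <= x:
--                 lo = mid + 1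
--             else:
--                 hi = mid
--         return lo
--
--     return sorted([e + bisect_right(s, e) for e in new] + s)
-- ===== Notes on version B (the rewrite author's own statement) =====
-- stated objective: faster
-- what changed: Instead of an O(m) linear count of existing elements <= e for every new element, B sorts existing once and finds each count by binary search (hand-written bisect_right), then sorts the combined list.
import Mathlib
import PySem

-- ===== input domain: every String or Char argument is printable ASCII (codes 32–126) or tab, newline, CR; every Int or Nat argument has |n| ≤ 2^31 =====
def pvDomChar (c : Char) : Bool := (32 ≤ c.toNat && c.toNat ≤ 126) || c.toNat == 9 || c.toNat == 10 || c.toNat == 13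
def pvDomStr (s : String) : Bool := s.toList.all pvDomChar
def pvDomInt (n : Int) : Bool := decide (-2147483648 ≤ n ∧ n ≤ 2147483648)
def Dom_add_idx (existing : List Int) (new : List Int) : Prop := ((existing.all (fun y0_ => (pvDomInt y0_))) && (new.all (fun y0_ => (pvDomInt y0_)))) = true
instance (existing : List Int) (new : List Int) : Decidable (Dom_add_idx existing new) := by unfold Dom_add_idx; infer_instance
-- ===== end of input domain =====

-- B replaces A's per-element linear count of existing ≤ e by a binary search on a
-- once-sorted copy of existing (objective: faster, asymptotic).

-- ===== PORT A =====
def add_idx (existing : List Int) (new : List Int) : List Int :=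
  -- c = []; for element in new: count = sum(1 for x in existing if x <= element); c.append(count + element)
  let c : List Int := new.foldl (fun c element =>
    let count : Int := existing.foldl (fun acc x => if x ≤ element then acc + 1 else acc) 0
    c ++ [count + element]) []
  -- c.extend(existing); c.sort()
  PySem.List.sorted (c ++ existing) (fun x => x) false

-- ===== PORT B =====
-- Source B's hand-written bisect_right is the standard lo/hi halving loop, which is
-- exactly PySem.List.bisectRight.
def add_idx_alt (existing : List Int) (new : List Int) : List Int :=
  let s := PySem.List.sorted existing (fun x => x) false
  PySem.List.sorted (new.map (fun e => e + (PySem.List.bisectRight s e : Int)) ++ s) (fun x => x) false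

-- ===== PRECONDITION & SPEC =====
def Spec_add_idx (existing : List Int) (new : List Int) (out : List Int) : Prop := out = add_idx_alt existing new
instance (existing : List Int) (new : List Int) (out : List Int) : Decidable (Spec_add_idx existing new out) := by unfold Spec_add_idx; infer_instance

-- ===== CLAIM (what is proved, stated in full; the proofs are below) =====
def Claim_equal_add_idx : Prop := ∀ (existing : List Int) (new : List Int), Dom_add_idx existing new → Spec_add_idx existing new (add_idx existing new)

-- ===== LEMMAS AND PROOFS =====

-- A's inner generator sum counts the elements ≤ e.
theorem count_foldl (existing : List Int) (e : Int) (acc : Int) :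
    existing.foldl (fun acc x => if x ≤ e then acc + 1 else acc) acc
      = acc + (existing.countP (fun y => decide (y ≤ e)) : Int) := by
  induction existing generalizing acc with
  | nil => simp
  | cons x xs ih =>
    simp only [List.foldl_cons, List.countP_cons, ih]
    by_cases h : x ≤ e
    · simp [h]; ring
    · simp [h]

-- Building a list by repeated append is a map.
theorem foldl_append_map (new : List Int) (f : Int → Int) (init : List Int) :
    new.foldl (fun c e => c ++ [f e]) init = init ++ new.map f := by
  induction new generalizing init with
  | nil => simp
  | cons e es ih => simp [ih]

-- On a sorted list, bisectRight returns the number of elements ≤ x.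
theorem bisectRight_eq_countP (s : List Int) (x : Int)
    (h : s.Pairwise (fun a b => a ≤ b)) :
    PySem.List.bisectRight s x = s.countP (fun y => decide (y ≤ x)) := by
  obtain ⟨hk, hlo, hhi⟩ := PySem.List.bisectRight_spec s x h
  set k := PySem.List.bisectRight s x with hkdef
  have hsplit : s = s.take k ++ s.drop k := (List.take_append_drop k s).symm
  have h1 : (s.take k).countP (fun y => decide (y ≤ x)) = (s.take k).length := by
    apply List.countP_eq_length.mpr
    intro a ha
    obtain ⟨i, hi, hget⟩ := List.getElem_of_mem ha
    have hik : i < k := lt_of_lt_of_le hi (by simp)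
    have hilen : i < s.length := lt_of_lt_of_le hik hk
    have := hlo i hilen hik
    simp only [List.getElem_take] at hget
    simpa [← hget] using this
  have h2 : (s.drop k).countP (fun y => decide (y ≤ x)) = 0 := by
    apply List.countP_eq_zero.mpr
    intro a ha
    obtain ⟨i, hi, hget⟩ := List.getElem_of_mem ha
    have hilen : k + i < s.length := by
      have := List.length_drop (i := k) (l := s) ▸ hi
      omega
    have hxlt := hhi (k + i) hilen (Nat.le_add_right k i)
    have hget' : s[k + i]'hilen = a := by
      simpa [List.getElem_drop] using hget
    simp [← hget']
    omega
  calc k = (s.take k).length := by simp [Nat.min_eq_left hk]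
    _ = (s.take k).countP (fun y => decide (y ≤ x)) + (s.drop k).countP (fun y => decide (y ≤ x)) := by rw [h1, h2]; ring
    _ = s.countP (fun y => decide (y ≤ x)) := by rw [← List.countP_append, ← hsplit]

-- ===== VERDICT (by name: the statement is the Claim_ definition above) =====
theorem add_idx_spec : Claim_equal_add_idx := by
  intro existing new _
  unfold Spec_add_idx add_idx add_idx_alt
  have hperm : (PySem.List.sorted existing (fun x => x) false).Perm existing :=
    PySem.List.sorted_perm existing (fun x => x) false
  have hpw : (PySem.List.sorted existing (fun x => x) false).Pairwise (fun a b => a ≤ b) :=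
    PySem.List.sorted_pairwise existing (fun x => x)
  -- the shifted values agree element by element
  have hmap : ∀ e : Int,
      (existing.foldl (fun acc x => if x ≤ e then acc + 1 else acc) 0) + e
        = e + (PySem.List.bisectRight (PySem.List.sorted existing (fun x => x) false) e : Int) := by
    intro e
    rw [count_foldl, bisectRight_eq_countP _ _ hpw, hperm.countP_eq]
    ring
  rw [foldl_append_map new (fun e =>
      (existing.foldl (fun acc x => if x ≤ e then acc + 1 else acc) 0) + e) []]
  rw [PySem.List.sorted_id_eq_sorted_id_iff_perm]
  simp only [List.nil_append]
  exact List.Perm.append (by rw [List.map_congr_left (fun e _ => hmap e)]) hperm.symm
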